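/- GENERATED by farm/mkstatement.py from design/units.tsv (unit `openbsd_reallocarray`) and the Specs of Gif/Spec/*.lean — do not edit.
   THE STATEMENT of the proof unit `openbsd_reallocarray`: the function `openbsd_reallocarray` (34 instructions) satisfies its contract,
   given the contracts of its callees. What the names mean: ProgX/Base/Spec/Basic.lean. The theorem to prove:
   `theorem openbsd_reallocarray_ok : Gif.Spec.openbsd_reallocarray.Statement`. -/
import Gif.Code
import Gif.Dec.All
import Gif.Labels
import Gif.Spec.Alloc
import ProgX.Base.Spec.Heap
namespace Gif.Spec.openbsd_reallocarray
open X86 X86.User Asan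

/-- The statement of unit `openbsd_reallocarray`. -/
def Statement : Prop :=
  ∀ (Lay : Layout) (_hLay : Lay.hi = 0x1000000) (μ : Microarch) (_hμ : UserX.MicroOK μ) (u₀ : State)
    (_hcode : HasCodeNat Lay u₀ Gif.L.openbsd_reallocarray.entry Gif.Code.code_openbsd_reallocarray.nat Gif.L.openbsd_reallocarray.size)
    (_h_realloc : ∀ (H : Heap) (rest : List Obj) (frames : List (Nat × FrameLayout)) (n c : Nat), Calls Lay μ ProgX.Base.WayInv (ProgX.Base.conv u₀) ProgX.Base.L.realloc.entry (ProgX.Base.Spec.realloc.spec H rest frames n c)),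
    ∀ (H : Heap) (rest : List Obj) (frames : List (Nat × FrameLayout)) (n c : Nat), Calls Lay μ ProgX.Base.WayInv (ProgX.Base.conv u₀) Gif.L.openbsd_reallocarray.entry (Gif.Spec.openbsd_reallocarray.spec H rest frames n c)

end Gif.Spec.openbsd_reallocarray
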